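-- pv_equiv track=rewrite | github.com/cpiccin/FIUBA | Algoritmos y Programacion I/Ejercicios - Guia/9. Diccionarios/EJ4.py | cadena_mas_larga
-- ===== SOURCE A (Python) =====
-- def cadena_mas_larga(texto):
-- 	dicc = {}
-- 	cadena = ''.join(texto.split()).lower()
--
-- 	for letra in cadena:
-- 		if letra in dicc:
-- 			continue
-- 		palabra_mayor = ''
--
-- 		for palabra in texto.split():
-- 			if letra in palabra.lower() and len(palabra) > len(palabra_mayor):
-- 				palabra_mayor = palabra
--
-- 		dicc[letra] = palabra_mayor
--
-- 	return dicc
-- ===== SOURCE B (Python) =====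
-- def cadena_mas_larga(texto):
-- 	dicc = {}
-- 	for palabra in texto.split():
-- 		for letra in palabra.lower():
-- 			if letra not in dicc or len(palabra) > len(dicc[letra]):
-- 				dicc[letra] = palabra
-- 	return dicc
-- ===== Notes on version B (the rewrite author's own statement) =====
-- stated objective: alternative
-- what changed: A rescans the full word list once per distinct letter of the text; B makes a single pass over the words, updating each contained letter's current longest word in a dict (strict-greater comparison keeps the earliest longest word and first-occurrence key order).
import Mathlib
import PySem

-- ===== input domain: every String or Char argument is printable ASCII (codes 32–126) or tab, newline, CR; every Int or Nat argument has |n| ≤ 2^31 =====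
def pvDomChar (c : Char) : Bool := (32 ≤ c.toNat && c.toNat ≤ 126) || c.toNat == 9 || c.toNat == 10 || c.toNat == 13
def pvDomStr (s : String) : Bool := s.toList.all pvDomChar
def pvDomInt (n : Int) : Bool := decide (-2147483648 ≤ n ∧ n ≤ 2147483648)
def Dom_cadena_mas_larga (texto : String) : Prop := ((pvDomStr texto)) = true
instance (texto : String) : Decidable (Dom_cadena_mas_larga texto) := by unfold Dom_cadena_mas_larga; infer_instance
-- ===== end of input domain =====

-- B replaces A's per-distinct-letter rescan of all words by a single pass over the words that
-- updates each contained letter's current longest word (strictly-greater, so the earliest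
-- longest word and the first-occurrence key order are preserved).

-- ===== PORT A =====
def cadena_mas_larga (texto : String) : List (String × String) :=
  let palabras := PySem.Str.split₀ texto
  let cadena : List Char :=
    PySem.Chars.lower (PySem.Chars.join [] (palabras.map String.toList))
  let dicc : PySem.Dict Char (List Char) :=
    cadena.foldl (fun d letra =>
      if d.contains letra = true then d
      else
        let palabra_mayor := palabras.foldl (fun pm palabra =>
          if PySem.Chars.isIn [letra] (PySem.Chars.lower palabra.toList) = true ∧
              pm.length < palabra.toList.length
          then palabra.toList else pm) []
        d.insert letra palabra_mayor) PySem.Dict.empty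
  dicc.items.map (fun p => (String.ofList [p.1], String.ofList p.2))

-- ===== PORT B =====
def cadena_mas_larga_alt (texto : String) : List (String × String) :=
  let dicc : PySem.Dict Char (List Char) :=
    (PySem.Str.split₀ texto).foldl (fun d palabra =>
      (PySem.Chars.lower palabra.toList).foldl (fun d letra =>
        if d.contains letra = false ∨ (d.getD letra []).length < palabra.toList.length
        then d.insert letra palabra.toList else d) d)
      PySem.Dict.empty
  dicc.items.map (fun p => (String.ofList [p.1], String.ofList p.2))

-- ===== PRECONDITION & SPEC =====
def Spec_cadena_mas_larga (texto : String) (out : List (String × String)) : Prop := out = cadena_mas_larga_alt texto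
instance (texto : String) (out : List (String × String)) : Decidable (Spec_cadena_mas_larga texto out) := by unfold Spec_cadena_mas_larga; infer_instance

-- ===== CLAIM (what is proved, stated in full; the proofs are below) =====
def Claim_equal_cadena_mas_larga : Prop := ∀ (texto : String), Dom_cadena_mas_larga texto → Spec_cadena_mas_larga texto (cadena_mas_larga texto)

-- ===== LEMMAS AND PROOFS =====

-- the result of A's inner scan: the first strictly-longest word (as char list) containing c
def pvBest (c : Char) (ws : List (List Char)) : List Char :=
  ws.foldl (fun pm p =>
    if PySem.Chars.isIn [c] (PySem.Chars.lower p) = true ∧ pm.length < p.length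
    then p else pm) []

-- one step of A's outer loop, over generic word lists
def pvStepA (ws : List (List Char)) (d : PySem.Dict Char (List Char)) (c : Char) :
    PySem.Dict Char (List Char) :=
  if d.contains c = true then d else d.insert c (pvBest c ws)

-- one step of B's inner loop while processing word p
def pvStepB (p : List Char) (d : PySem.Dict Char (List Char)) (c : Char) :
    PySem.Dict Char (List Char) :=
  if d.contains c = false ∨ (d.getD c []).length < p.length then d.insert c p else d

-- how one word updates the current optional value for a letter it contains
def pvUpd1 (v : Option (List Char)) (p : List Char) : Option (List Char) :=
  match v with
  | none => some p
  | some q => if q.length < p.length then some p else some q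

-- how one word updates the current optional value for letter c
def pvUpd (c : Char) (v : Option (List Char)) (p : List Char) : Option (List Char) :=
  if c ∈ PySem.Chars.lower p then pvUpd1 v p else v

theorem pv_isIn_singleton (c : Char) (s : List Char) :
    PySem.Chars.isIn [c] s = true ↔ c ∈ s := by
  rw [PySem.Chars.isIn_iff_infix, List.singleton_infix_iff]

theorem pv_flatten_intersperse_nil : ∀ (xss : List (List Char)),
    (List.intersperse ([] : List Char) xss).flatten = xss.flatten
  | [] => rfl
  | [x] => rfl
  | x :: y :: t => by
      rw [List.intersperse_cons₂]
      simp [pv_flatten_intersperse_nil (y :: t)]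

theorem pv_cadena_eq (xss : List (List Char)) :
    PySem.Chars.lower (PySem.Chars.join [] xss) = xss.flatMap PySem.Chars.lower := by
  simp only [PySem.Chars.join, List.intercalate, pv_flatten_intersperse_nil,
    List.flatMap_def]
  simp only [PySem.Chars.lower, List.map_flatten]
  rfl

-- keys after A's loop
theorem pv_keysA (ws : List (List Char)) :
    ∀ (l : List Char) (d : PySem.Dict Char (List Char)),
      (l.foldl (pvStepA ws) d).keys = PySem.Set.update d.keys l
  | [], _ => rfl
  | a :: t, d => by
      rw [List.foldl_cons, pv_keysA ws t]
      have : (pvStepA ws d a).keys = PySem.Set.add d.keys a := by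
        unfold pvStepA
        by_cases h : d.contains a = true
        · rw [if_pos h, PySem.Set.add_eq_ite,
            if_pos ((PySem.Dict.contains_iff_mem_keys d a).mp h)]
        · rw [if_neg h, PySem.Dict.keys_insert_of_not_contains d _ (by simpa using h),
            PySem.Set.add_eq_ite,
            if_neg (fun hm => h ((PySem.Dict.contains_iff_mem_keys d a).mpr hm))]
      rw [this]; rfl

-- get? at a key already present is never changed by A's loop
theorem pv_get?A_pres (ws : List (List Char)) :
    ∀ (l : List Char) (d : PySem.Dict Char (List Char)) (c : Char),
      d.contains c = true → (l.foldl (pvStepA ws) d).get? c = d.get? c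
  | [], _, _, _ => rfl
  | a :: t, d, c, h => by
      rw [List.foldl_cons]
      have hc : (pvStepA ws d a).contains c = true := by
        unfold pvStepA
        by_cases ha : d.contains a = true
        · rw [if_pos ha]; exact h
        · rw [if_neg ha, PySem.Dict.contains_insert]; simp [h]
      rw [pv_get?A_pres ws t _ c hc]
      unfold pvStepA
      by_cases ha : d.contains a = true
      · rw [if_pos ha]
      · rw [if_neg ha, PySem.Dict.get?_insert]
        have : c ≠ a := fun he => ha (he ▸ h)
        rw [if_neg this]

-- get? of a letter of l after A's loop from a state not containing it
theorem pv_get?A (ws : List (List Char)) :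
    ∀ (l : List Char) (d : PySem.Dict Char (List Char)) (c : Char),
      c ∈ l → d.contains c = false →
      (l.foldl (pvStepA ws) d).get? c = some (pvBest c ws)
  | a :: t, d, c, hm, h => by
      rw [List.foldl_cons]
      by_cases hac : a = c
      · subst hac
        have hstep : pvStepA ws d a = d.insert a (pvBest a ws) := by
          unfold pvStepA; rw [if_neg (by simp [h])]
        rw [hstep,
          pv_get?A_pres ws t _ a (by rw [PySem.Dict.contains_insert]; simp),
          PySem.Dict.get?_insert, if_pos rfl]
      · have hmt : c ∈ t := by cases hm with
          | head => exact absurd rfl hac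
          | tail _ h' => exact h'
        have hc : (pvStepA ws d a).contains c = false := by
          unfold pvStepA
          by_cases ha : d.contains a = true
          · rw [if_pos ha]; exact h
          · have hca : ¬ c = a := fun he => hac he.symm
            rw [if_neg ha, PySem.Dict.contains_insert]
            simp [h, hca]
        exact pv_get?A ws t _ c hmt hc

-- keys after B's inner loop over one word
theorem pv_keysB_word (p : List Char) :
    ∀ (l : List Char) (d : PySem.Dict Char (List Char)),
      (l.foldl (pvStepB p) d).keys = PySem.Set.update d.keys l
  | [], _ => rfl
  | a :: t, d => by
      rw [List.foldl_cons, pv_keysB_word p t]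
      have : (pvStepB p d a).keys = PySem.Set.add d.keys a := by
        unfold pvStepB
        by_cases h : d.contains a = true
        · have hmem : a ∈ d.keys := (PySem.Dict.contains_iff_mem_keys d a).mp h
          by_cases h2 : d.contains a = false ∨ (d.getD a []).length < p.length
          · rw [if_pos h2, PySem.Dict.keys_insert_of_contains d _ h,
              PySem.Set.add_eq_ite, if_pos hmem]
          · rw [if_neg h2, PySem.Set.add_eq_ite, if_pos hmem]
        · rw [if_pos (Or.inl (by simpa using h)),
            PySem.Dict.keys_insert_of_not_contains d _ (by simpa using h),
            PySem.Set.add_eq_ite,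
            if_neg (fun hm => h ((PySem.Dict.contains_iff_mem_keys d a).mpr hm))]
      rw [this]; rfl

-- get? c after B's inner loop over char list l of word p
theorem pv_get?B_word (p : List Char) :
    ∀ (l : List Char) (d : PySem.Dict Char (List Char)) (c : Char),
      (l.foldl (pvStepB p) d).get? c =
        if c ∈ l then pvUpd1 (d.get? c) p else d.get? c
  | [], _, _ => by simp
  | a :: t, d, c => by
      rw [List.foldl_cons, pv_get?B_word p t]
      by_cases hac : a = c
      · subst hac
        have hval : (pvStepB p d a).get? a = pvUpd1 (d.get? a) p := by
          by_cases h : d.contains a = true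
          · obtain ⟨q, hq⟩ : ∃ q, d.get? a = some q := by
              cases hg : d.get? a with
              | none => exact absurd ((PySem.Dict.get?_eq_none_iff_contains d a).mp hg) (by simp [h])
              | some q => exact ⟨q, rfl⟩
            have hgd : d.getD a [] = q := PySem.Dict.getD_of_get?_eq_some d [] hq
            unfold pvStepB
            rw [hq]
            by_cases h2 : q.length < p.length
            · rw [if_pos (Or.inr (hgd ▸ h2)), PySem.Dict.get?_insert, if_pos rfl]
              simp [pvUpd1, h2]
            · rw [if_neg (by simp [h, hgd, h2]), hq]
              simp [pvUpd1, h2]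
          · unfold pvStepB
            rw [if_pos (Or.inl (by simpa using h)), PySem.Dict.get?_insert, if_pos rfl,
              show d.get? a = none from
                (PySem.Dict.get?_eq_none_iff_contains d a).mpr (by simpa using h)]
            rfl
        by_cases hmt : a ∈ t
        · rw [if_pos hmt, if_pos (List.mem_cons_self), hval]
          -- applying p twice is the same as once
          unfold pvUpd1
          cases hg : d.get? a with
          | none => simp
          | some q => by_cases h2 : q.length < p.length <;> simp [h2]
        · rw [if_neg hmt, if_pos (List.mem_cons_self), hval]
      · have hpres : (pvStepB p d a).get? c = d.get? c := by
          unfold pvStepB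
          by_cases h : d.contains a = false ∨ (d.getD a []).length < p.length
          · rw [if_pos h, PySem.Dict.get?_insert, if_neg (fun he => hac he.symm)]
          · rw [if_neg h]
        rw [hpres]
        by_cases hmt : c ∈ t
        · rw [if_pos hmt, if_pos (List.mem_cons_of_mem a hmt)]
        · have hca : ¬ c = a := fun he => hac he.symm
          rw [if_neg hmt, if_neg (by simp [hca, hmt])]

-- get? c after B's outer loop, expressed as a fold of pvUpd over the words
theorem pv_get?B (c : Char) :
    ∀ (ws : List (List Char)) (d : PySem.Dict Char (List Char)),
      (ws.foldl (fun d p => (PySem.Chars.lower p).foldl (pvStepB p) d) d).get? c =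
        ws.foldl (pvUpd c) (d.get? c)
  | [], _ => rfl
  | p :: t, d => by
      rw [List.foldl_cons, List.foldl_cons, pv_get?B c t, pv_get?B_word]
      unfold pvUpd
      rfl

-- keys after B's outer loop
theorem pv_keysB :
    ∀ (ws : List (List Char)) (d : PySem.Dict Char (List Char)),
      (ws.foldl (fun d p => (PySem.Chars.lower p).foldl (pvStepB p) d) d).keys =
        PySem.Set.update d.keys (ws.flatMap PySem.Chars.lower)
  | [], _ => rfl
  | p :: t, d => by
      rw [List.foldl_cons, pv_keysB t, pv_keysB_word, List.flatMap_cons]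
      show _ = List.foldl PySem.Set.add d.keys (PySem.Chars.lower p ++ _)
      rw [List.foldl_append]
      rfl

-- lockstep: B's value fold for letter c tracks A's inner best-word fold
theorem pv_lockstep (c : Char) :
    ∀ (ws : List (List Char)) (v : Option (List Char)) (pm : List Char),
      (v = some pm ∨ (v = none ∧ pm = [])) →
      (ws.foldl (pvUpd c) v =
          some (ws.foldl (fun pm p =>
            if PySem.Chars.isIn [c] (PySem.Chars.lower p) = true ∧ pm.length < p.length
            then p else pm) pm)) ∨
        (v = none ∧ ws.foldl (pvUpd c) v = none ∧ ∀ p ∈ ws, c ∉ PySem.Chars.lower p)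
  | [], v, pm, hinv => by
      cases hinv with
      | inl h => exact Or.inl (by simpa using h)
      | inr h => exact Or.inr ⟨h.1, by simpa using h.1, by simp⟩
  | p :: t, v, pm, hinv => by
      rw [List.foldl_cons, List.foldl_cons]
      by_cases hc : c ∈ PySem.Chars.lower p
      · have hup : pvUpd c v p = pvUpd1 v p := by unfold pvUpd; rw [if_pos hc]
        have hpne : p ≠ [] := by
          intro he; subst he; simp [PySem.Chars.lower] at hc
        have hlen : 0 < p.length := List.length_pos_iff.mpr hpne
        have hmem : PySem.Chars.isIn [c] (PySem.Chars.lower p) = true :=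
          (pv_isIn_singleton c _).mpr hc
        cases hinv with
        | inl h =>
            subst h
            have hnext : pvUpd1 (some pm) p =
                some (if PySem.Chars.isIn [c] (PySem.Chars.lower p) = true ∧
                    pm.length < p.length then p else pm) := by
              by_cases h2 : pm.length < p.length
              · simp [pvUpd1, hmem, h2]
              · simp [pvUpd1, h2]
            have := pv_lockstep c t (pvUpd1 (some pm) p)
              (if PySem.Chars.isIn [c] (PySem.Chars.lower p) = true ∧
                  pm.length < p.length then p else pm) (Or.inl hnext)
            rw [hup]
            cases this with
            | inl h' => exact Or.inl h'
            | inr h' => exact absurd h'.1 (by by_cases h2 : pm.length < p.length <;> simp [pvUpd1, h2])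
        | inr h =>
            obtain ⟨hv, hpm⟩ := h; subst hv; subst hpm
            have hnext : pvUpd1 (none : Option (List Char)) p =
                some (if PySem.Chars.isIn [c] (PySem.Chars.lower p) = true ∧
                    ([] : List Char).length < p.length then p else []) := by
              simp [pvUpd1, hmem, hlen]
            have := pv_lockstep c t (pvUpd1 none p)
              (if PySem.Chars.isIn [c] (PySem.Chars.lower p) = true ∧
                  ([] : List Char).length < p.length then p else []) (Or.inl hnext)
            rw [hup]
            cases this with
            | inl h' => exact Or.inl h'
            | inr h' => exact absurd h'.1 (by simp [pvUpd1])
      · have hup : pvUpd c v p = v := by unfold pvUpd; rw [if_neg hc]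
        have hmem : ¬ (PySem.Chars.isIn [c] (PySem.Chars.lower p) = true ∧
            pm.length < p.length) := fun hh => hc ((pv_isIn_singleton c _).mp hh.1)
        rw [hup, if_neg hmem]
        cases pv_lockstep c t v pm hinv with
        | inl h' => exact Or.inl h'
        | inr h' =>
            refine Or.inr ⟨h'.1, h'.2.1, ?_⟩
            intro q hq
            cases hq with
            | head => exact hc
            | tail _ hq' => exact h'.2.2 q hq'

-- the two dictionaries coincide
theorem pv_dict_eq (ws : List (List Char)) :
    ((ws.flatMap PySem.Chars.lower).foldl (pvStepA ws) PySem.Dict.empty) =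
      (ws.foldl (fun d p => (PySem.Chars.lower p).foldl (pvStepB p) d) PySem.Dict.empty) := by
  set L := ws.flatMap PySem.Chars.lower with hL
  set dA := L.foldl (pvStepA ws) PySem.Dict.empty with hdA
  set dB := ws.foldl (fun d p => (PySem.Chars.lower p).foldl (pvStepB p) d)
    PySem.Dict.empty with hdB
  have hkA : dA.keys = PySem.Set.ofList L := by
    rw [hdA, pv_keysA, PySem.Dict.keys_empty]; rfl
  have hkB : dB.keys = PySem.Set.ofList L := by
    rw [hdB, pv_keysB, PySem.Dict.keys_empty]; rfl
  have hndA : dA.keys.Nodup := by rw [hkA]; exact PySem.Set.nodup_ofList L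
  have hndB : dB.keys.Nodup := by rw [hkB]; exact PySem.Set.nodup_ofList L
  apply PySem.Dict.ext
  rw [PySem.Dict.items_eq_map_keys dA hndA [], PySem.Dict.items_eq_map_keys dB hndB [],
    hkA, hkB]
  apply List.map_congr_left
  intro c hcmem
  have hcL : c ∈ L := (PySem.Set.mem_ofList L c).mp hcmem
  have hA : dA.get? c = some (pvBest c ws) := by
    rw [hdA]
    exact pv_get?A ws L PySem.Dict.empty c hcL (PySem.Dict.contains_empty c)
  have hB : dB.get? c = some (pvBest c ws) := by
    rw [hdB, pv_get?B, PySem.Dict.get?_empty]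
    obtain ⟨p, hp, hcp⟩ := List.mem_flatMap.mp (hL ▸ hcL)
    cases pv_lockstep c ws none [] (Or.inr ⟨rfl, rfl⟩) with
    | inl h => exact h
    | inr h => exact absurd hcp (h.2.2 p hp)
  rw [PySem.Dict.getD_of_get?_eq_some dA [] hA, PySem.Dict.getD_of_get?_eq_some dB [] hB]

-- ===== VERDICT (by name: the statement is the Claim_ definition above) =====
theorem cadena_mas_larga_spec : Claim_equal_cadena_mas_larga := by
  intro texto _
  show cadena_mas_larga texto = cadena_mas_larga_alt texto
  simp only [cadena_mas_larga, cadena_mas_larga_alt]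
  congr 1
  have h1 : (fun (d : PySem.Dict Char (List Char)) (letra : Char) =>
      if d.contains letra = true then d
      else d.insert letra ((PySem.Str.split₀ texto).foldl (fun pm palabra =>
        if PySem.Chars.isIn [letra] (PySem.Chars.lower palabra.toList) = true ∧
            pm.length < palabra.toList.length then palabra.toList else pm) []))
      = pvStepA ((PySem.Str.split₀ texto).map String.toList) := by
    funext d c
    unfold pvStepA pvBest
    rw [List.foldl_map]
  rw [pv_cadena_eq, h1, pv_dict_eq, List.foldl_map]
  rfl
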